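-- pv_equiv track=rewrite | github.com/OpenAutoCoder/Agentless | agentless/util/preprocess_data.py | correct_file_paths
-- ===== SOURCE A (Python) =====
-- def correct_file_paths(model_found_files, files, include_partial_paths=True):
--     found_files = []
--     if model_found_files:
--         for model_file in model_found_files:
--             found_match = False
--             # Check if any model found file is a subset of the current file path
--             for file_content in files:
--                 file = file_content[0]
--                 if model_file == file:
--                     found_files.append(file)
--                     found_match = True
--             if include_partial_paths and not found_match:
--                 for file_content in files:
--                     file = file_content[0]
--                     if file.endswith(model_file):
--                         found_files.append(file)
--                         break  # No need to check further, we found a match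
--         return found_files
--     else:
--         return []
-- ===== SOURCE B (Python) =====
-- def correct_file_paths(model_found_files, files, include_partial_paths=True):
--     if not model_found_files:
--         return []
--     paths = [fc[0] for fc in files]
--     counts = {}
--     for p in paths:
--         counts[p] = counts.get(p, 0) + 1
--     suffix_first = {}
--     for p in paths:
--         for i in range(len(p) + 1):
--             s = p[i:]
--             if s not in suffix_first:
--                 suffix_first[s] = p
--     found_files = []
--     for m in model_found_files:
--         c = counts.get(m, 0)
--         if c:
--             found_files += [m] * c
--         elif include_partial_paths and m in suffix_first:
--             found_files.append(suffix_first[m])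
--     return found_files
-- ===== Notes on version B (the rewrite author's own statement) =====
-- stated objective: alternative
-- what changed: Replaces the per-query linear scans over files with indexes built once: an exact-match counter dict and a suffix-to-first-path dict (all suffixes of each path), so each model file is answered by dict lookups instead of scanning all files.
import Mathlib
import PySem

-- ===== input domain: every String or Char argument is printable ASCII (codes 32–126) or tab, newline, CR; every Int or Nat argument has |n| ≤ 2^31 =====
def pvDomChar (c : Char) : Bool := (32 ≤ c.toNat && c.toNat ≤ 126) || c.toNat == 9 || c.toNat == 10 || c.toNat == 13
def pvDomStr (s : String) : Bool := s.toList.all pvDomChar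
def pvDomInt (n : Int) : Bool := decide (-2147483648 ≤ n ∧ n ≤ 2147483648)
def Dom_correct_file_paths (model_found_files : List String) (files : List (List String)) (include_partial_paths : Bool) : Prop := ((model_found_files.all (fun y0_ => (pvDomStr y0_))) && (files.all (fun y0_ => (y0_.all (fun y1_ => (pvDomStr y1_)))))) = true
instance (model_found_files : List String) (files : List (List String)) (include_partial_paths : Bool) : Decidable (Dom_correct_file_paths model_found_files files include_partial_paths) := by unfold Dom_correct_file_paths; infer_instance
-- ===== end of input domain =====

-- B builds an exact-match counter and a suffix->first-path index once, replacing A's per-query scans over files with dict lookups (alternative algorithm, same results).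
-- Pre_ excludes inputs where A raises IndexError (an empty inner list in files, reached only when model_found_files is nonempty).


-- ===== PORT A =====
-- file_content[0] is ported as .headD "" ; Pre_ guarantees the inner lists are nonempty wherever it is reached.
def correct_file_paths (model_found_files : List String) (files : List (List String)) (include_partial_paths : Bool) : List String :=
  if model_found_files ≠ [] then
    model_found_files.foldl (fun found_files model_file =>
      -- inner exact-match scan, accumulating (found_files, found_match)
      let st := files.foldl (fun (acc : List String × Bool) file_content =>
        let file := file_content.headD ""
        if model_file = file then (acc.1 ++ [file], true) else acc) (found_files, false)
      if include_partial_paths && !st.2 then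
        -- scan with break: first file whose path ends with model_file
        match files.find? (fun file_content => PySem.Str.endswith (file_content.headD "") model_file) with
        | some file_content => st.1 ++ [file_content.headD ""]
        | none => st.1
      else st.1) []
  else []

-- ===== PORT B =====
def correct_file_paths_alt (model_found_files : List String) (files : List (List String)) (include_partial_paths : Bool) : List String :=
  if model_found_files = [] then []
  else
    let paths := files.map (fun fc => fc.headD "")
    let counts : PySem.Dict String Int :=
      paths.foldl (fun d p => d.insert p (d.getD p 0 + 1)) PySem.Dict.empty
    let suffix_first : PySem.Dict String String :=
      paths.foldl (fun d p =>
        (List.range (p.toList.length + 1)).foldl (fun d i =>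
          let s := String.ofList (p.toList.drop i)
          if !(d.contains s) then d.insert s p else d) d) PySem.Dict.empty
    model_found_files.foldl (fun found_files m =>
      let c := counts.getD m 0
      if c ≠ 0 then found_files ++ List.replicate c.toNat m
      else if include_partial_paths then
        match suffix_first.get? m with
        | some p => found_files ++ [p]
        | none => found_files
      else found_files) []

-- ===== PRECONDITION & SPEC =====
-- Pre_ excludes exactly the inputs on which Python A raises IndexError: an empty inner list in files while model_found_files is nonempty.
def Pre_correct_file_paths (model_found_files : List String) (files : List (List String)) (include_partial_paths : Bool) : Prop :=
  model_found_files = [] ∨ ∀ fc ∈ files, fc ≠ []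
instance (model_found_files : List String) (files : List (List String)) (include_partial_paths : Bool) : Decidable (Pre_correct_file_paths model_found_files files include_partial_paths) := by unfold Pre_correct_file_paths; infer_instance
def pvWitness_correct_file_paths : List String × List (List String) × Bool :=
  (["a.py", "y"], [["x/a.py", "c"], ["b.py"]], true)
def Spec_correct_file_paths (model_found_files : List String) (files : List (List String)) (include_partial_paths : Bool) (out : List String) : Prop := out = correct_file_paths_alt model_found_files files include_partial_paths
instance (model_found_files : List String) (files : List (List String)) (include_partial_paths : Bool) (out : List String) : Decidable (Spec_correct_file_paths model_found_files files include_partial_paths out) := by unfold Spec_correct_file_paths; infer_instance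

-- ===== CLAIM (what is proved, stated in full; the proofs are below) =====
def Claim_equal_correct_file_paths : Prop := ∀ (model_found_files : List String) (files : List (List String)) (include_partial_paths : Bool), Dom_correct_file_paths model_found_files files include_partial_paths → Pre_correct_file_paths model_found_files files include_partial_paths → Spec_correct_file_paths model_found_files files include_partial_paths (correct_file_paths model_found_files files include_partial_paths)

-- ===== LEMMAS AND PROOFS =====

-- A's inner exact-match scan appends model_file once per occurrence and records whether any occurred.
theorem innerA_eq (m : String) (files : List (List String)) (acc : List String) (b : Bool) :
    files.foldl (fun (acc : List String × Bool) file_content =>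
      let file := file_content.headD ""
      if m = file then (acc.1 ++ [file], true) else acc) (acc, b)
    = (acc ++ List.replicate ((files.map (fun fc => fc.headD "")).count m) m,
       b || (files.map (fun fc => fc.headD "")).contains m) := by
  induction files generalizing acc b with
  | nil => simp
  | cons f fs ih =>
    simp only [List.foldl_cons, List.map_cons]
    generalize f.headD "" = x
    by_cases h : m = x
    · subst h
      rw [if_pos rfl, ih]
      simp [List.replicate_succ]
    · rw [if_neg h, ih]
      have h1 : (x == m) = false := beq_eq_false_iff_ne.mpr (Ne.symm h)
      have h2 : (m == x) = false := beq_eq_false_iff_ne.mpr h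
      simp [List.count_cons, h, Ne.symm h]

-- first-wins insertion over a list of keys: get? afterwards
theorem foldl_insert_if_absent (ks : List String) (p : String) (d : PySem.Dict String String) (s : String) :
    (ks.foldl (fun d k => if !(d.contains k) then d.insert k p else d) d).get? s
    = match d.get? s with
      | some v => some v
      | none => if s ∈ ks then some p else none := by
  induction ks generalizing d with
  | nil => cases h : d.get? s <;> simp [h]
  | cons k ks ih =>
    simp only [List.foldl_cons]
    by_cases hc : d.contains k = true
    · rw [hc]
      simp only [Bool.not_true, Bool.false_eq_true, if_false]
      rw [ih]
      cases h : d.get? s with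
      | some v => simp
      | none =>
        have hne : s ≠ k := by
          intro e; subst e
          rw [PySem.Dict.contains_eq_isSome_get?, h] at hc; simp at hc
        simp [List.mem_cons, hne]
    · simp only [Bool.not_eq_true] at hc
      have hstep : (if (!d.contains k) = true then d.insert k p else d) = d.insert k p := by
        rw [hc]; simp
      rw [hstep, ih, PySem.Dict.get?_insert]
      by_cases he : s = k
      · subst he
        have h0 : d.get? s = none := by
          rw [PySem.Dict.contains_eq_isSome_get?] at hc
          cases h : d.get? s with
          | none => rfl
          | some v => rw [h] at hc; simp at hc
        simp [h0]
      · rw [if_neg he]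
        cases h : d.get? s <;> simp [List.mem_cons, he]

-- membership in the suffix list = endswith
theorem mem_suffixes_iff (p s : String) :
    (s ∈ (List.range (p.toList.length + 1)).map (fun i => String.ofList (p.toList.drop i)))
    ↔ PySem.Str.endswith p s = true := by
  rw [PySem.Str.endswith_eq, PySem.Chars.endswith_iff]
  constructor
  · intro h
    simp only [List.mem_map, List.mem_range] at h
    obtain ⟨i, _, rfl⟩ := h
    rw [String.toList_ofList]
    exact List.drop_suffix i p.toList
  · intro h
    have hd := List.suffix_iff_eq_drop.mp h
    simp only [List.mem_map, List.mem_range]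
    exact ⟨p.toList.length - s.toList.length, by omega, by rw [← hd, String.ofList_toList]⟩

-- one outer step of building suffix_first
theorem bigstep_get? (p : String) (d : PySem.Dict String String) (s : String) :
    ((List.range (p.toList.length + 1)).foldl (fun d i =>
        let t := String.ofList (p.toList.drop i)
        if !(d.contains t) then d.insert t p else d) d).get? s
    = match d.get? s with
      | some v => some v
      | none => if PySem.Str.endswith p s then some p else none := by
  have h1 : (List.range (p.toList.length + 1)).foldl (fun d i =>
        let t := String.ofList (p.toList.drop i)
        if !(d.contains t) then d.insert t p else d) d
      = ((List.range (p.toList.length + 1)).map (fun i => String.ofList (p.toList.drop i))).foldl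
          (fun d k => if !(d.contains k) then d.insert k p else d) d := by
    rw [List.foldl_map]
  rw [h1, foldl_insert_if_absent]
  cases h : d.get? s with
  | some v => rfl
  | none =>
    simp only []
    by_cases hm : PySem.Str.endswith p s = true
    · rw [if_pos ((mem_suffixes_iff p s).mpr hm), if_pos hm]
    · rw [if_neg (fun hmem => hm ((mem_suffixes_iff p s).mp hmem)),
          if_neg (by simpa using hm)]

-- the full suffix_first dict answers: first path ending with s
theorem suffix_first_get? (paths : List String) (d : PySem.Dict String String) (s : String) :
    (paths.foldl (fun d p =>
        (List.range (p.toList.length + 1)).foldl (fun d i =>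
          let t := String.ofList (p.toList.drop i)
          if !(d.contains t) then d.insert t p else d) d) d).get? s
    = match d.get? s with
      | some v => some v
      | none => paths.find? (fun p => PySem.Str.endswith p s) := by
  induction paths generalizing d with
  | nil => cases h : d.get? s <;> simp [h]
  | cons p ps ih =>
    simp only [List.foldl_cons]
    rw [ih, bigstep_get? p d s]
    cases h : d.get? s with
    | some v => rfl
    | none =>
      simp only [PySem.Str.endswith_eq, List.find?_cons]
      by_cases he : PySem.Chars.endswith p.toList s.toList = true
      · rw [if_pos he, he]
      · have he' : PySem.Chars.endswith p.toList s.toList = false := by simpa using he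
        rw [if_neg he, he']

-- ===== VERDICT (by name: the statement is the Claim_ definition above) =====
theorem correct_file_paths_spec : Claim_equal_correct_file_paths := by
  intro mfs files ipp _ _
  unfold Spec_correct_file_paths correct_file_paths correct_file_paths_alt
  by_cases h : mfs = []
  · simp [h]
  · rw [if_pos h, if_neg h]
    apply List.foldl_ext
    intro acc m _
    simp only []
    rw [innerA_eq m files acc false]
    rw [PySem.Dict.getD_foldl_insert_add_one, PySem.Dict.getD_empty, zero_add]
    rw [suffix_first_get?, PySem.Dict.get?_empty]
    simp only []
    set paths := files.map (fun fc => fc.headD "") with hp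
    by_cases hc : paths.contains m = true
    · have hmem : m ∈ paths := by simpa using hc
      have hcnt : paths.count m ≠ 0 :=
        Nat.pos_iff_ne_zero.mp (List.count_pos_iff.mpr hmem)
      have hcnt' : ((paths.count m : Int)) ≠ 0 := by exact_mod_cast hcnt
      simp [hcnt, hmem]
    · simp only [Bool.not_eq_true] at hc
      have hcnt : paths.count m = 0 := List.count_eq_zero.mpr (by simpa using hc)
      cases ipp with
      | false => simp [hcnt]
      | true =>
        simp only [hc, hcnt, Bool.false_or, Bool.not_false, Bool.and_true,
          Nat.cast_zero, ne_eq, not_true_eq_false, if_false, List.replicate_zero,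
          List.append_nil, if_true]
        rw [hp, List.find?_map]
        have hco : ((fun p => PySem.Str.endswith p m) ∘ fun (fc : List String) => fc.headD "")
            = (fun (file_content : List String) => PySem.Str.endswith (file_content.headD "") m) := rfl
        rw [hco]
        cases files.find? (fun file_content => PySem.Str.endswith (file_content.headD "") m) <;>
          simp
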